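-- pv_equiv track=rewrite | github.com/dainsiahtill-dev/Polaris | src/backend/polaris/domain/verification/write_gate.py | _scope_matches
-- ===== SOURCE A (Python) =====
-- def _scope_matches(file_path: str, scopes: set[str]) -> bool:
--     """Check if file_path matches any scope pattern.
--
--     Supports:
--     - Exact match: "src/fastapi_entrypoint.py" matches "src/fastapi_entrypoint.py"
--     - Directory prefix: "src/utils/helper.py" matches "src/utils"
--     - Module prefix: "src/utils/helper.py" matches "src/utils" (as directory)
--     """
--     normalized_path = file_path.replace("\\", "/")
--
--     for scope in scopes:
--         normalized_scope = scope.replace("\\", "/").rstrip("/")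
--
--         # Exact match
--         if normalized_path == normalized_scope:
--             return True
--
--         # Wildcards
--         if normalized_scope in (".", "*", "**"):
--             return True
--
--         # Directory prefix match
--         if normalized_path.startswith(normalized_scope + "/"):
--             return True
--
--         # Check if scope is a directory containing the file
--         scope_as_dir = normalized_scope
--         if normalized_path.startswith(scope_as_dir + "/"):
--             return True
--
--     return False
-- ===== SOURCE B (Python) =====
-- def _scope_matches(file_path: str, scopes: set[str]) -> bool:
--     """Check if file_path matches any scope pattern (set-lookup formulation)."""
--     path = file_path.replace("\\", "/")
--     normalized = {s.replace("\\", "/").rstrip("/") for s in scopes}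
--     if not normalized.isdisjoint({".", "*", "**"}):
--         return True
--     # Candidate keys: the path itself, plus every prefix that ends right
--     # before a '/' (so scope + "/" is a prefix of the path).
--     candidates = {path}
--     prefix = ""
--     for c in path:
--         if c == "/":
--             candidates.add(prefix)
--         prefix += c
--     return not candidates.isdisjoint(normalized)
-- ===== Notes on version B (the rewrite author's own statement) =====
-- stated objective: idiomatic
-- what changed: Instead of re-normalizing and testing each scope against the path in a loop of four prefix checks, B normalizes the scopes once into a set, early-returns on the wildcard sentinels, and builds the path's candidate keys (the path plus every prefix ending before a '/') in one pass, answering by set intersection.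
import Mathlib
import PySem

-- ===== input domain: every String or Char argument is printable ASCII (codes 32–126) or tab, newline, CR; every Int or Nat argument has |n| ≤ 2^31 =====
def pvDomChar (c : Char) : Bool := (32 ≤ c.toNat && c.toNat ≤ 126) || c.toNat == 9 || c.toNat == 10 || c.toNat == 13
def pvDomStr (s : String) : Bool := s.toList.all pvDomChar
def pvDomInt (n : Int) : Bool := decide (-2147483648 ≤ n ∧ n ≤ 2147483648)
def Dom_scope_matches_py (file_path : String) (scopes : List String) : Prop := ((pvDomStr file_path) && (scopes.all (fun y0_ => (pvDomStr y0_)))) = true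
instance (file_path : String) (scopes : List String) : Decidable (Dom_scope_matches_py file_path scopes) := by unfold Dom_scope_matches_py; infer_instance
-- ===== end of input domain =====

-- B replaces A's loop over the scopes by a set of normalized scopes plus candidate
-- keys built from the path's '/'-prefixes (idiomatic set-lookup formulation; same cost class).

-- s.rstrip("/") ported by hand (PySem.Chars.stripChars strips both sides): exact —
-- Python removes exactly the maximal run of trailing '/' characters.
def pvRstripSlash (cs : List Char) : List Char :=
  ((cs.reverse).dropWhile (fun c => c == '/')).reverse

-- scope.replace("\\", "/").rstrip("/") — used verbatim by both Pythons
def pvNormScope (s : String) : List Char :=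
  pvRstripSlash (PySem.Chars.replace s.toList ['\\'] ['/'])

-- ===== PORT A =====
-- the 'for scope in scopes' loop with its early returns (branches in A's order,
-- including the duplicated scope_as_dir prefix test)
def pvGoA (np : List Char) : List String → Bool
  | [] => false
  | s :: rest =>
    let ns := pvNormScope s
    if np = ns then true
    else if ns = ['.'] ∨ ns = ['*'] ∨ ns = ['*', '*'] then true
    else if PySem.Chars.startswith np (ns ++ ['/']) then true
    else if PySem.Chars.startswith np (ns ++ ['/']) then true  -- scope_as_dir = normalized_scope
    else pvGoA np rest

def scope_matches_py (file_path : String) (scopes : List String) : Bool :=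
  pvGoA (PySem.Chars.replace file_path.toList ['\\'] ['/']) scopes

-- ===== PORT B =====
-- the 'for c in path' loop of Source B: carries (candidates, prefix)
def pvStepB (st : PySem.Set (List Char) × List Char) (c : Char) : PySem.Set (List Char) × List Char :=
  if c = '/' then (PySem.Set.add st.1 st.2, st.2 ++ [c]) else (st.1, st.2 ++ [c])

def scope_matches_py_alt (file_path : String) (scopes : List String) : Bool :=
  let path := PySem.Chars.replace file_path.toList ['\\'] ['/']
  let normalized : PySem.Set (List Char) := PySem.Set.ofList (scopes.map pvNormScope)
  if !(PySem.Set.isdisjoint normalized (PySem.Set.ofList [['.'], ['*'], ['*', '*']])) then true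
  else
    let candidates := (path.foldl pvStepB (PySem.Set.ofList [path], [])).1
    !(PySem.Set.isdisjoint candidates normalized)

-- ===== PRECONDITION & SPEC =====
def Spec_scope_matches_py (file_path : String) (scopes : List String) (out : Bool) : Prop := out = scope_matches_py_alt file_path scopes
instance (file_path : String) (scopes : List String) (out : Bool) : Decidable (Spec_scope_matches_py file_path scopes out) := by unfold Spec_scope_matches_py; infer_instance

-- ===== CLAIM (what is proved, stated in full; the proofs are below) =====
def Claim_equal_scope_matches_py : Prop := ∀ (file_path : String) (scopes : List String), Dom_scope_matches_py file_path scopes → Spec_scope_matches_py file_path scopes (scope_matches_py file_path scopes)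

-- ===== LEMMAS AND PROOFS =====

-- A's loop is an existential over scopes
lemma pvGoA_iff (np : List Char) (scopes : List String) :
    pvGoA np scopes = true ↔
      ∃ s ∈ scopes, np = pvNormScope s ∨
        (pvNormScope s = ['.'] ∨ pvNormScope s = ['*'] ∨ pvNormScope s = ['*', '*']) ∨
        (pvNormScope s ++ ['/']) <+: np := by
  induction scopes with
  | nil => simp [pvGoA]
  | cons s rest ih =>
    simp only [pvGoA, List.mem_cons]
    split_ifs with h1 h2 h3 <;>
      simp_all [PySem.Chars.startswith_iff] <;> tauto

-- invariant of Source B's prefix-collecting fold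
lemma pvFoldB_mem (l : List Char) (S : PySem.Set (List Char)) (pre : List Char) (x : List Char) :
    x ∈ (l.foldl pvStepB (S, pre)).1 ↔
      x ∈ S ∨ ∃ t u, l = t ++ '/' :: u ∧ x = pre ++ t := by
  induction l generalizing S pre with
  | nil => simp
  | cons c l ih =>
    simp only [List.foldl_cons, pvStepB]
    split_ifs with hc
    · subst hc
      rw [ih]
      constructor
      · rintro (h | ⟨t, u, rfl, rfl⟩)
        · rcases (PySem.Set.mem_add _ _ _).mp h with h | rfl
          · exact Or.inl h
          · exact Or.inr ⟨[], l, rfl, by simp⟩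
        · exact Or.inr ⟨'/' :: t, u, rfl, by simp⟩
      · rintro (h | ⟨t, u, ht, rfl⟩)
        · exact Or.inl ((PySem.Set.mem_add _ _ _).mpr (Or.inl h))
        · cases t with
          | nil =>
            refine Or.inl ((PySem.Set.mem_add _ _ _).mpr (Or.inr (by simp)))
          | cons a t =>
            simp only [List.cons_append, List.cons.injEq] at ht
            obtain ⟨rfl, ht⟩ := ht
            exact Or.inr ⟨t, u, ht, by simp⟩
    · rw [ih]
      constructor
      · rintro (h | ⟨t, u, rfl, rfl⟩)
        · exact Or.inl h
        · exact Or.inr ⟨c :: t, u, rfl, by simp⟩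
      · rintro (h | ⟨t, u, ht, rfl⟩)
        · exact Or.inl h
        · cases t with
          | nil => simp_all
          | cons a t =>
            simp only [List.cons_append, List.cons.injEq] at ht
            obtain ⟨rfl, ht⟩ := ht
            exact Or.inr ⟨t, u, ht, by simp⟩

-- the candidate set of Source B holds exactly the path and the scopes whose dir-prefix matches
lemma pvCandidates_mem (path x : List Char) :
    x ∈ (path.foldl pvStepB (PySem.Set.ofList [path], [])).1 ↔
      x = path ∨ (x ++ ['/']) <+: path := by
  rw [pvFoldB_mem]
  constructor
  · rintro (h | ⟨t, u, rfl, rfl⟩)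
    · simp at h; exact Or.inl h
    · exact Or.inr ⟨u, by simp⟩
  · rintro (rfl | ⟨u, rfl⟩)
    · exact Or.inl (by simp)
    · exact Or.inr ⟨x, u, by simp, by simp⟩

lemma pv_ab_iff (file_path : String) (scopes : List String) :
    scope_matches_py file_path scopes = true ↔ scope_matches_py_alt file_path scopes = true := by
  unfold scope_matches_py scope_matches_py_alt
  rw [pvGoA_iff]
  set np := PySem.Chars.replace file_path.toList ['\\'] ['/'] with hnp
  by_cases hw : ∃ s ∈ scopes,
      pvNormScope s = ['.'] ∨ pvNormScope s = ['*'] ∨ pvNormScope s = ['*', '*']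
  · obtain ⟨s, hs, h⟩ := hw
    have hB : (!(PySem.Set.isdisjoint (PySem.Set.ofList (scopes.map pvNormScope))
        (PySem.Set.ofList [['.'], ['*'], ['*', '*']]))) = true := by
      simp only [Bool.not_eq_true']
      rw [Bool.eq_false_iff, Ne, PySem.Set.isdisjoint_iff]
      push Not
      refine ⟨pvNormScope s, (PySem.Set.mem_ofList _ _).mpr (List.mem_map_of_mem hs), ?_⟩
      exact (PySem.Set.mem_ofList _ _).mpr (by rcases h with h | h | h <;> simp [h])
    simp only [hB, if_true, iff_true]
    exact ⟨s, hs, Or.inr (Or.inl h)⟩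
  · have hB : (!(PySem.Set.isdisjoint (PySem.Set.ofList (scopes.map pvNormScope))
        (PySem.Set.ofList [['.'], ['*'], ['*', '*']]))) = false := by
      simp only [Bool.not_eq_false']
      rw [PySem.Set.isdisjoint_iff]
      intro x hx hxw
      rw [PySem.Set.mem_ofList, List.mem_map] at hx
      obtain ⟨s, hs, rfl⟩ := hx
      rw [PySem.Set.mem_ofList] at hxw
      exact hw ⟨s, hs, by simpa using hxw⟩
    simp only [hB, Bool.false_eq_true, if_false, Bool.not_eq_true']
    rw [Bool.eq_false_iff, Ne, PySem.Set.isdisjoint_iff]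
    push Not
    constructor
    · rintro ⟨s, hs, h⟩
      refine ⟨pvNormScope s, ?_, (PySem.Set.mem_ofList _ _).mpr (List.mem_map_of_mem hs)⟩
      rw [pvCandidates_mem]
      rcases h with h | h | h
      · exact Or.inl h.symm
      · exact absurd ⟨s, hs, h⟩ hw
      · exact Or.inr h
    · rintro ⟨x, hx, hxn⟩
      rw [PySem.Set.mem_ofList, List.mem_map] at hxn
      obtain ⟨s, hs, rfl⟩ := hxn
      rw [pvCandidates_mem] at hx
      rcases hx with h | h
      · exact ⟨s, hs, Or.inl h.symm⟩
      · exact ⟨s, hs, Or.inr (Or.inr h)⟩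

theorem scope_matches_py_spec : Claim_equal_scope_matches_py := by
  intro file_path scopes _
  unfold Spec_scope_matches_py
  exact Bool.eq_iff_iff.mpr (pv_ab_iff file_path scopes)
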